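-- pv_equiv track=rewrite | github.com/gene-kira/ASI | # 🔮 MagicBox Memory Dashboard (AI-Powered Edition).py | cluster_mutations
-- ===== SOURCE A (Python) =====
-- def cluster_mutations(mutations):
--     clusters = {'stable': [], 'mutating': [], 'threat': []}
--     for m in mutations:
--         if m['type'] == 'mutation':
--             clusters['mutating'].append(m)
--         elif m['type'] == 'threat':
--             clusters['threat'].append(m)
--         else:
--             clusters['stable'].append(m)
--     return clusters
-- ===== SOURCE B (Python) =====
-- def cluster_mutations(mutations):
--     def partition(items, pred):
--         yes, no = [], []
--         for x in items:
--             (yes if pred(x) else no).append(x)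
--         return yes, no
--     mutating, rest = partition(mutations, lambda m: m['type'] == 'mutation')
--     threat, stable = partition(rest, lambda m: m['type'] == 'threat')
--     return {'stable': stable, 'mutating': mutating, 'threat': threat}
-- ===== Notes on version B (the rewrite author's own statement) =====
-- stated objective: alternative
-- what changed: Replaces the three-way dispatch into a pre-built dict of buckets with a pipeline of two generic binary partitions: first split off 'mutation' items, then split the remainder into 'threat' vs 'stable'.
import Mathlib
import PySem

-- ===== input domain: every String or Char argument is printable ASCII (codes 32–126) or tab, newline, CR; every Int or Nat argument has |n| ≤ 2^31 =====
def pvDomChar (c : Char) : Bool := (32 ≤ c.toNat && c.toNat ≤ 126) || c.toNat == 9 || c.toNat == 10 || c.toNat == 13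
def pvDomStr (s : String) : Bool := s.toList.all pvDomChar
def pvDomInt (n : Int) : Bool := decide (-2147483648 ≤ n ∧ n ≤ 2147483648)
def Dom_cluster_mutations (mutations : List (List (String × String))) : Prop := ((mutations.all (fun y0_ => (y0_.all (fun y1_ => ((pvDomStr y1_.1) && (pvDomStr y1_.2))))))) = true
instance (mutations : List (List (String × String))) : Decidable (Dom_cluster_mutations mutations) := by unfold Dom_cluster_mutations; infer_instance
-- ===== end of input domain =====

-- B replaces the three-way dispatch into a pre-built dict with a pipeline of two generic binary partitions.

-- ===== PORT A =====
-- one bucketing pass: a dict of three empty buckets, each m appended to the bucket chosen by m['type']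
def cluster_mutations (mutations : List (List (String × String))) : List (String × List (List (String × String))) :=
  let clusters : PySem.Dict String (List (List (String × String))) :=
    PySem.Dict.ofList [("stable", []), ("mutating", []), ("threat", [])]
  (mutations.foldl (fun cl m =>
    if ((PySem.Dict.mk m).get? "type").getD "" == "mutation" then cl.modify "mutating" [] (· ++ [m])
    else if ((PySem.Dict.mk m).get? "type").getD "" == "threat" then cl.modify "threat" [] (· ++ [m])
    else cl.modify "stable" [] (· ++ [m])) clusters).items

-- ===== PORT B =====
-- B's helper 'partition': one pass appending each item to the yes- or no-list
def pvPartitionB (pred : List (String × String) → Bool) (items : List (List (String × String))) :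
    List (List (String × String)) × List (List (String × String)) :=
  items.foldl (fun yn x => if pred x then (yn.1 ++ [x], yn.2) else (yn.1, yn.2 ++ [x])) ([], [])

-- pipeline of two binary partitions
def cluster_mutations_alt (mutations : List (List (String × String))) : List (String × List (List (String × String))) :=
  let p1 := pvPartitionB (fun m => ((PySem.Dict.mk m).get? "type").getD "" == "mutation") mutations
  let p2 := pvPartitionB (fun m => ((PySem.Dict.mk m).get? "type").getD "" == "threat") p1.2
  [("stable", p2.2), ("mutating", p1.1), ("threat", p2.1)]

-- ===== PRECONDITION & SPEC =====
-- Pre_ excludes items without a 'type' key, on which Python A (and Python B) raise KeyError.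
def Pre_cluster_mutations (mutations : List (List (String × String))) : Prop :=
  (mutations.all (fun m => (PySem.Dict.mk m).contains "type")) = true
instance (mutations : List (List (String × String))) : Decidable (Pre_cluster_mutations mutations) := by unfold Pre_cluster_mutations; infer_instance
def pvWitness_cluster_mutations : (List (List (String × String))) := [[("type", "mutation")], [("type", "ok")]]
def Spec_cluster_mutations (mutations : List (List (String × String))) (out : List (String × List (List (String × String)))) : Prop := out = cluster_mutations_alt mutations
instance (mutations : List (List (String × String))) (out : List (String × List (List (String × String)))) : Decidable (Spec_cluster_mutations mutations out) := by unfold Spec_cluster_mutations; infer_instance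

-- ===== CLAIM (what is proved, stated in full; the proofs are below) =====
def Claim_equal_cluster_mutations : Prop := ∀ (mutations : List (List (String × String))), Dom_cluster_mutations mutations → Pre_cluster_mutations mutations → Spec_cluster_mutations mutations (cluster_mutations mutations)

-- ===== LEMMAS AND PROOFS =====

-- B's partition computes the two complementary filters
theorem pvPartitionB_loop (pred : List (String × String) → Bool) (ms : List (List (String × String)))
    (a b : List (List (String × String))) :
    (ms.foldl (fun yn x => if pred x then (yn.1 ++ [x], yn.2) else (yn.1, yn.2 ++ [x])) (a, b)) =
      (a ++ ms.filter pred, b ++ ms.filter (fun x => !pred x)) := by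
  induction ms generalizing a b with
  | nil => simp
  | cons m ms ih =>
    rw [List.foldl_cons]
    by_cases h : pred m = true
    · rw [if_pos h, ih]; simp [h]
    · rw [if_neg h, ih]; simp [h]

theorem pvPartitionB_eq (pred : List (String × String) → Bool) (ms : List (List (String × String))) :
    pvPartitionB pred ms = (ms.filter pred, ms.filter (fun x => !pred x)) := by
  simpa using pvPartitionB_loop pred ms [] []

-- how each modify acts on the literal three-key state
theorem modify_mutating (s mu t : List (List (String × String))) (m : List (String × String)) :
    (PySem.Dict.mk [("stable", s), ("mutating", mu), ("threat", t)]).modify "mutating" [] (· ++ [m]) =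
      PySem.Dict.mk [("stable", s), ("mutating", mu ++ [m]), ("threat", t)] := by
  simp [PySem.Dict.modify, PySem.Dict.insert, PySem.Dict.getD, PySem.Dict.get?, PySem.Dict.contains]

theorem modify_threat (s mu t : List (List (String × String))) (m : List (String × String)) :
    (PySem.Dict.mk [("stable", s), ("mutating", mu), ("threat", t)]).modify "threat" [] (· ++ [m]) =
      PySem.Dict.mk [("stable", s), ("mutating", mu), ("threat", t ++ [m])] := by
  simp [PySem.Dict.modify, PySem.Dict.insert, PySem.Dict.getD, PySem.Dict.get?, PySem.Dict.contains]

theorem modify_stable (s mu t : List (List (String × String))) (m : List (String × String)) :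
    (PySem.Dict.mk [("stable", s), ("mutating", mu), ("threat", t)]).modify "stable" [] (· ++ [m]) =
      PySem.Dict.mk [("stable", s ++ [m]), ("mutating", mu), ("threat", t)] := by
  simp [PySem.Dict.modify, PySem.Dict.insert, PySem.Dict.getD, PySem.Dict.get?, PySem.Dict.contains]

-- loop invariant of A's fold over the literal three-key dict state
theorem cluster_mutations_loop (ms : List (List (String × String)))
    (s mu t : List (List (String × String))) :
    (ms.foldl (fun cl m =>
      if ((PySem.Dict.mk m).get? "type").getD "" == "mutation" then cl.modify "mutating" [] (· ++ [m])
      else if ((PySem.Dict.mk m).get? "type").getD "" == "threat" then cl.modify "threat" [] (· ++ [m])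
      else cl.modify "stable" [] (· ++ [m]))
      (PySem.Dict.mk [("stable", s), ("mutating", mu), ("threat", t)])) =
    PySem.Dict.mk
      [("stable", s ++ ms.filter (fun m =>
          !(((PySem.Dict.mk m).get? "type").getD "" == "mutation" || ((PySem.Dict.mk m).get? "type").getD "" == "threat"))),
       ("mutating", mu ++ ms.filter (fun m => ((PySem.Dict.mk m).get? "type").getD "" == "mutation")),
       ("threat", t ++ ms.filter (fun m => ((PySem.Dict.mk m).get? "type").getD "" == "threat"))] := by
  induction ms generalizing s mu t with
  | nil => simp
  | cons m ms ih =>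
    rw [List.foldl_cons]
    by_cases h1 : (((PySem.Dict.mk m).get? "type").getD "" == "mutation") = true
    · rw [if_pos h1, modify_mutating, ih]
      simp [eq_of_beq h1]
    · rw [if_neg h1]
      by_cases h2 : (((PySem.Dict.mk m).get? "type").getD "" == "threat") = true
      · rw [if_pos h2, modify_threat, ih]
        simp [eq_of_beq h2]
      · rw [if_neg h2, modify_stable, ih]
        simp [h1, h2]

-- ===== VERDICT (by name: the statement is the Claim_ definition above) =====
theorem cluster_mutations_spec : Claim_equal_cluster_mutations := by
  intro mutations _ _
  show _ = _
  simp only [cluster_mutations, cluster_mutations_alt, pvPartitionB_eq]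
  rw [show (PySem.Dict.ofList [("stable", ([] : List (List (String × String)))), ("mutating", []), ("threat", [])]) = PySem.Dict.mk [("stable", []), ("mutating", []), ("threat", [])] from rfl]
  rw [cluster_mutations_loop]
  simp
  refine ⟨List.filter_congr fun m _ => ?_, List.filter_congr fun m _ => ?_⟩
  · exact Bool.and_comm _ _
  · by_cases h : (((PySem.Dict.mk m).get? "type").getD "" == "threat") = true
    · rw [eq_of_beq h]; simp
    · simp [h]
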